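-- pv_equiv track=rewrite | github.com/bhack/mini-eq | src/mini_eq/filter_chain.py | build_builtin_biquad_links
-- ===== SOURCE A (Python) =====
-- def biquad_node_name(side: str, index: int) -> str:
--     return f"band_{side}_{index}"
--
-- def preamp_node_name(side: str) -> str:
--     return f"preamp_{side}"
--
-- def build_builtin_biquad_links(band_count: int) -> str:
--     links: list[str] = []
--
--     for side in ("l", "r"):
--         previous = preamp_node_name(side)
--
--         for index in range(band_count):
--             current = biquad_node_name(side, index)
--             links.append(f'      {{ output = "{previous}:Out" input = "{current}:In" }}')
--             previous = current
--
--     return "\n".join(links)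
-- ===== SOURCE B (Python) =====
-- def biquad_node_name(side: str, index: int) -> str:
--     return f"band_{side}_{index}"
--
-- def preamp_node_name(side: str) -> str:
--     return f"preamp_{side}"
--
-- def build_builtin_biquad_links(band_count: int) -> str:
--     # Flat formulation: there are exactly 2*n links; the k-th link is computed
--     # from index arithmetic alone (side and in-side position j derived from k),
--     # with the source node reconstructed from j instead of carried along.
--     n = band_count if band_count > 0 else 0
--     lines = []
--     for k in range(2 * n):
--         side = "l" if k < n else "r"
--         j = k if k < n else k - n
--         src = preamp_node_name(side) if j == 0 else biquad_node_name(side, j - 1)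
--         lines.append(f'      {{ output = "{src}:Out" input = "{biquad_node_name(side, j)}:In" }}')
--     return "\n".join(lines)
-- ===== Notes on version B (the rewrite author's own statement) =====
-- stated objective: alternative
-- what changed: Replaces A's nested side/index loops carrying a running `previous` node with one flat loop over all link positions of both sides, computing side, in-side index and the source node of each link by index arithmetic alone (no carried state, no per-side nesting).
import Mathlib
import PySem

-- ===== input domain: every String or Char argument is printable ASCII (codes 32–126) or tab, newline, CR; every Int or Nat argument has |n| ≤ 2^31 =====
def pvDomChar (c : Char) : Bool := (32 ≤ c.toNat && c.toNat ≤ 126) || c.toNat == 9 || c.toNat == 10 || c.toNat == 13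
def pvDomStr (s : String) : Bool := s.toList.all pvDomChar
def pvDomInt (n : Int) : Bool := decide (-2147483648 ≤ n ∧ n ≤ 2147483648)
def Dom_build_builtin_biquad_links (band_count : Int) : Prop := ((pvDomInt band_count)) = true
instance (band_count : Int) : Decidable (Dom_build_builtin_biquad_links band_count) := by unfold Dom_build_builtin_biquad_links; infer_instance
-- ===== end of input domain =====

-- B replaces A's nested loops with a running `previous` node by one flat loop over
-- the 2*n link positions, deriving side/index/source by arithmetic (objective: alternative).


-- ===== PORT A =====
def biquad_node_name (side : String) (index : Int) : String :=
  "band_" ++ side ++ "_" ++ PySem.Int.toStr index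

def preamp_node_name (side : String) : String :=
  "preamp_" ++ side

-- f'      {{ output = "{src}:Out" input = "{dst}:In" }}'
def pvLinkFmt (src dst : String) : String :=
  "      { output = \"" ++ src ++ ":Out\" input = \"" ++ dst ++ ":In\" }"

def build_builtin_biquad_links (band_count : Int) : String :=
  let links : List String :=
    ["l", "r"].foldl (fun (links : List String) side =>
      let st := (PySem.List.pyRange 0 band_count 1).foldl
        (fun (st : String × List String) index =>
          let current := biquad_node_name side index
          (current, st.2 ++ [pvLinkFmt st.1 current]))
        (preamp_node_name side, links)
      st.2) []
  PySem.Str.join "\n" links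

-- ===== PORT B =====
def build_builtin_biquad_links_alt (band_count : Int) : String :=
  let n : Int := if band_count > 0 then band_count else 0
  let line : Int → String := fun k =>
    let side := if k < n then "l" else "r"
    let j := if k < n then k else k - n
    let src := if j = 0 then preamp_node_name side else biquad_node_name side (j - 1)
    pvLinkFmt src (biquad_node_name side j)
  PySem.Str.join "\n"
    ((PySem.List.pyRange 0 (2 * n) 1).foldl (fun acc k => acc ++ [line k]) [])

-- ===== PRECONDITION & SPEC =====
def Spec_build_builtin_biquad_links (band_count : Int) (out : String) : Prop := out = build_builtin_biquad_links_alt band_count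
instance (band_count : Int) (out : String) : Decidable (Spec_build_builtin_biquad_links band_count out) := by unfold Spec_build_builtin_biquad_links; infer_instance

-- ===== CLAIM =====
def Claim_equal_build_builtin_biquad_links : Prop := ∀ (band_count : Int), Dom_build_builtin_biquad_links band_count → Spec_build_builtin_biquad_links band_count (build_builtin_biquad_links band_count)

-- ===== LEMMAS AND PROOFS =====

-- A's inner loop over one side, started at `prev` with accumulated `acc`.
theorem pv_side_loop (side : String) (xs : List Int) (prev : String) (acc : List String) :
    (xs.foldl (fun (st : String × List String) index =>
        let current := biquad_node_name side index
        (current, st.2 ++ [pvLinkFmt st.1 current])) (prev, acc)).2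
  = acc ++ ((prev :: xs.map (biquad_node_name side)).zip
            (xs.map (biquad_node_name side))).map (fun p => pvLinkFmt p.1 p.2) := by
  induction xs generalizing prev acc with
  | nil => simp
  | cons i xs ih =>
    simp only [List.foldl, List.map_cons, List.zip_cons_cons, List.map]
    rw [ih]
    simp

-- the adjacent-pair list over range m equals a positional map reconstructing the source
theorem pv_pairs_eq (m : Nat) (f : Nat → String) (prev : String) :
    ((prev :: (List.range m).map f).zip ((List.range m).map f)).map (fun p => pvLinkFmt p.1 p.2)
  = (List.range m).map (fun j => pvLinkFmt (if j = 0 then prev else f (j - 1)) (f j)) := by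
  induction m generalizing f prev with
  | zero => simp
  | succ m ih =>
    rw [List.range_succ_eq_map]
    simp only [List.map_cons, List.map_map, List.zip_cons_cons]
    have := ih (fun j => f (j + 1)) (f 0)
    rw [show (f ∘ fun i => i + 1) = (fun j => f (j + 1)) from rfl]
    rw [this]
    congr 1
    apply List.map_congr_left
    intro j _
    by_cases hj : j = 0
    · simp [hj]
    · have h1 : j - 1 + 1 = j := Nat.succ_pred_eq_of_pos (Nat.pos_of_ne_zero hj)
      simp [hj, h1]

theorem pv_foldl_app {α β : Type} (xs : List α) (g : α → β) (init : List β) :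
    xs.foldl (fun acc k => acc ++ [g k]) init = init ++ xs.map g := by
  induction xs generalizing init with
  | nil => simp
  | cons x xs ih => simp [List.foldl, ih]

-- canonical per-side line list, indexed over Nat
def pvCanon (side : String) (m : Nat) : List String :=
  (List.range m).map (fun (j : Nat) =>
    pvLinkFmt (if j = 0 then preamp_node_name side else biquad_node_name side ((j : Int) - 1))
              (biquad_node_name side (j : Int)))

theorem pv_range_cast (n : Int) :
    PySem.List.pyRange 0 n 1 = (List.range n.toNat).map (fun k : Nat => (k : Int)) := by
  rw [PySem.List.pyRange_one]
  simp only [Int.sub_zero, zero_add]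

-- A's adjacent-pair list for one side is the canonical list
theorem pv_A_side (side : String) (n : Int) :
    ((preamp_node_name side :: (PySem.List.pyRange 0 n 1).map (biquad_node_name side)).zip
      ((PySem.List.pyRange 0 n 1).map (biquad_node_name side))).map (fun p => pvLinkFmt p.1 p.2)
  = pvCanon side n.toNat := by
  rw [pv_range_cast, List.map_map,
    show (biquad_node_name side ∘ fun k : Nat => (k : Int))
       = (fun k : Nat => biquad_node_name side (k : Int)) from rfl,
    pv_pairs_eq n.toNat (fun k : Nat => biquad_node_name side (k : Int)) (preamp_node_name side)]
  unfold pvCanon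
  apply List.map_congr_left
  intro j _
  by_cases hj : j = 0
  · simp [hj]
  · have h1 : ((j - 1 : Nat) : Int) = (j : Int) - 1 := by omega
    simp [hj, h1]

-- B's flat line function, written out (the port's `line` after substitution)
theorem pv_B_left (n : Int) :
    (PySem.List.pyRange 0 n 1).map (fun k =>
      pvLinkFmt
        (if (if k < n then k else k - n) = 0 then preamp_node_name (if k < n then "l" else "r")
         else biquad_node_name (if k < n then "l" else "r") ((if k < n then k else k - n) - 1))
        (biquad_node_name (if k < n then "l" else "r") (if k < n then k else k - n)))
  = pvCanon "l" n.toNat := by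
  rw [pv_range_cast n, List.map_map]
  unfold pvCanon
  apply List.map_congr_left
  intro j hj
  simp only [List.mem_range] at hj
  have hjn : (j : Int) < n := by omega
  simp only [Function.comp_apply, hjn, if_pos]
  by_cases h0 : j = 0
  · simp [h0]
  · simp [h0]

theorem pv_B_right (n : Int) :
    (PySem.List.pyRange n (2 * n) 1).map (fun k =>
      pvLinkFmt
        (if (if k < n then k else k - n) = 0 then preamp_node_name (if k < n then "l" else "r")
         else biquad_node_name (if k < n then "l" else "r") ((if k < n then k else k - n) - 1))
        (biquad_node_name (if k < n then "l" else "r") (if k < n then k else k - n)))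
  = pvCanon "r" n.toNat := by
  have hnat2 : PySem.List.pyRange n (2 * n) 1
      = (List.range n.toNat).map (fun k : Nat => n + (k : Int)) := by
    rw [PySem.List.pyRange_one]
    have h2 : 2 * n - n = n := by ring
    rw [h2]
  rw [hnat2, List.map_map]
  unfold pvCanon
  apply List.map_congr_left
  intro j hj
  simp only [List.mem_range] at hj
  have hge : ¬ (n + (j : Int) < n) := by omega
  have hsub : n + (j : Int) - n = (j : Int) := by ring
  simp only [Function.comp_apply, hge, if_false, hsub]
  by_cases h0 : j = 0
  · simp [h0]
  · simp [h0]

theorem build_builtin_biquad_links_eq (band_count : Int) :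
    build_builtin_biquad_links band_count = build_builtin_biquad_links_alt band_count := by
  unfold build_builtin_biquad_links build_builtin_biquad_links_alt
  set n : Int := if band_count > 0 then band_count else 0 with hn
  have hn0 : 0 ≤ n := by rw [hn]; split <;> omega
  have hrange : PySem.List.pyRange 0 band_count 1 = PySem.List.pyRange 0 n 1 := by
    rw [hn]; split
    · rfl
    · rw [PySem.List.pyRange_one_eq_nil (by omega), PySem.List.pyRange_one_eq_nil (by omega)]
  simp only [List.foldl, hrange, pv_side_loop, List.nil_append]
  rw [pv_A_side "l" n, pv_A_side "r" n, pv_foldl_app,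
    PySem.List.pyRange_one_append 0 n (2 * n) hn0 (by omega), List.map_append,
    pv_B_left n, pv_B_right n, List.nil_append]

-- ===== VERDICT =====
theorem build_builtin_biquad_links_spec : Claim_equal_build_builtin_biquad_links := by
  intro band_count _
  unfold Spec_build_builtin_biquad_links
  exact build_builtin_biquad_links_eq band_count
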